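-- pv_equiv track=rewrite | github.com/Y1fe1Zh0u/PDFLLM | src/ingestion/chunker.py | _split_text_and_tables
-- ===== SOURCE A (Python) =====
-- def _split_text_and_tables(section_text: str) -> list[dict]:
--     """将章节内容分离为文本块和表格块
--
--     Returns:
--         [{"type": "text"|"table", "content": "..."}, ...]
--     """
--     lines = section_text.split("\n")
--     blocks: list[dict] = []
--     current_type = "text"
--     current_lines: list[str] = []
--
--     for line in lines:
--         is_table_line = line.strip().startswith("|")
--
--         if is_table_line and current_type == "text":
--             # 切换到表格：先保存之前的文本
--             if current_lines:
--                 text = "\n".join(current_lines).strip()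
--                 if text:
--                     blocks.append({"type": "text", "content": text})
--             current_lines = [line]
--             current_type = "table"
--         elif not is_table_line and current_type == "table":
--             # 切换回文本：先保存之前的表格
--             if current_lines:
--                 table = "\n".join(current_lines).strip()
--                 if table:
--                     blocks.append({"type": "table", "content": table})
--             current_lines = [line]
--             current_type = "text"
--         else:
--             current_lines.append(line)
--
--     # 保存最后一块
--     if current_lines:
--         content = "\n".join(current_lines).strip()
--         if content:
--             blocks.append({"type": current_type, "content": content})
--
--     return blocks
-- ===== SOURCE B (Python) =====
-- def _split_text_and_tables(section_text: str) -> list[dict]: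
--     """将章节内容分离为文本块和表格块 (run-grouping re-implementation)."""
--     lines = section_text.split("\n")
--     blocks: list[dict] = []
--     i = 0
--     n = len(lines)
--     while i < n:
--         is_table = lines[i].strip().startswith("|")
--         j = i + 1
--         while j < n and lines[j].strip().startswith("|") == is_table:
--             j += 1
--         content = "\n".join(lines[i:j]).strip()
--         if content:
--             blocks.append({"type": "table" if is_table else "text", "content": content})
--         i = j
--     return blocks
-- ===== Notes on version B (the rewrite author's own statement) =====
-- stated objective: simpler
-- what changed: Replaced the current_type/current_lines flush-on-switch state machine with a two-level scan that finds each maximal run of same-kind lines and emits its block directly.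
import Mathlib
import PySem

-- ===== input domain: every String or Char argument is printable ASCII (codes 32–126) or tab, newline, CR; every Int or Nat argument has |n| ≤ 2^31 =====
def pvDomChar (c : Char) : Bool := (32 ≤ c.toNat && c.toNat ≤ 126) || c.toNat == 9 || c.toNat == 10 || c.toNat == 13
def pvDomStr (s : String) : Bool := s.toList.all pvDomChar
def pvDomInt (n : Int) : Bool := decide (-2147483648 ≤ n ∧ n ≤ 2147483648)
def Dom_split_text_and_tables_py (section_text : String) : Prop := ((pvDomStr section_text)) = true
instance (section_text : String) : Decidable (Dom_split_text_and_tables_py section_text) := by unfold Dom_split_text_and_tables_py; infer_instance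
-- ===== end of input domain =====

-- B replaces A's flush-on-switch state machine by a two-level scan over maximal runs of
-- same-kind lines (objective: simpler, same cost).

-- ===== PORT A =====
-- shared elementary pieces of both Pythons: line.strip().startswith("|"),
-- "\n".join(ls).strip(), and the {"type": t, "content": c} dict
def pvIsTable (line : String) : Bool := PySem.Str.startswith (PySem.Str.strip line) "|"
def pvJoinStrip (ls : List String) : String := PySem.Str.strip (PySem.Str.join "\n" ls)
def pvBlock (t c : String) : List (String × String) := [("type", t), ("content", c)]

-- the body of A's 'for line in lines' loop, on state (blocks, current_type, current_lines)
def pvStepA (st : List (List (String × String)) × String × List String) (line : String) :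
    List (List (String × String)) × String × List String :=
  let is_table_line := pvIsTable line
  if is_table_line = true ∧ st.2.1 = "text" then
    (if st.2.2 ≠ [] then
       (let text := pvJoinStrip st.2.2
        if text ≠ "" then st.1 ++ [pvBlock "text" text] else st.1)
     else st.1, "table", [line])
  else if is_table_line = false ∧ st.2.1 = "table" then
    (if st.2.2 ≠ [] then
       (let table := pvJoinStrip st.2.2
        if table ≠ "" then st.1 ++ [pvBlock "table" table] else st.1)
     else st.1, "text", [line])
  else (st.1, st.2.1, st.2.2 ++ [line])

-- the final 'save the last block' step
def pvFinishA (st : List (List (String × String)) × String × List String) :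
    List (List (String × String)) :=
  if st.2.2 ≠ [] then
    (let content := pvJoinStrip st.2.2
     if content ≠ "" then st.1 ++ [pvBlock st.2.1 content] else st.1)
  else st.1

def split_text_and_tables_py (section_text : String) : List (List (String × String)) :=
  pvFinishA (((PySem.Str.split? section_text "\n").getD []).foldl pvStepA ([], "text", []))

-- ===== PORT B =====
-- inner 'while j < n and lines[j].strip().startswith("|") == is_table' scan:
-- returns (the rest of the current run, the remaining lines)
def pvTakeRun (k : Bool) : List String → List String × List String
  | [] => ([], [])
  | l :: ls =>
    if pvIsTable l = k then
      ((pvTakeRun k ls).1.cons l, (pvTakeRun k ls).2)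
    else ([], l :: ls)

theorem pvTakeRun_rest_len (k : Bool) (ls : List String) :
    (pvTakeRun k ls).2.length ≤ ls.length := by
  induction ls with
  | nil => simp [pvTakeRun]
  | cons l ls ih =>
    simp only [pvTakeRun]
    split
    · exact ih.trans (Nat.le_succ _)
    · simp

-- outer 'while i < n' loop: emit one block per maximal run
def pvAltGo : List String → List (List (String × String))
  | [] => []
  | l :: ls =>
    let k := pvIsTable l
    let content := pvJoinStrip (l :: (pvTakeRun k ls).1)
    (if content ≠ "" then [pvBlock (if k then "table" else "text") content] else [])
      ++ pvAltGo (pvTakeRun k ls).2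
  termination_by ls => ls.length
  decreasing_by simpa using Nat.lt_succ_of_le (pvTakeRun_rest_len _ _)

def split_text_and_tables_py_alt (section_text : String) : List (List (String × String)) :=
  pvAltGo ((PySem.Str.split? section_text "\n").getD [])

-- ===== PRECONDITION & SPEC =====
def Spec_split_text_and_tables_py (section_text : String) (out : List (List (String × String))) : Prop := out = split_text_and_tables_py_alt section_text
instance (section_text : String) (out : List (List (String × String))) : Decidable (Spec_split_text_and_tables_py section_text out) := by unfold Spec_split_text_and_tables_py; infer_instance

-- ===== CLAIM (what is proved, stated in full; the proofs are below) =====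
def Claim_equal_split_text_and_tables_py : Prop := ∀ (section_text : String), Dom_split_text_and_tables_py section_text → Spec_split_text_and_tables_py section_text (split_text_and_tables_py section_text)

-- ===== LEMMAS AND PROOFS =====

-- the block a nonempty run of kind k emits
def pvEmit (k : Bool) (ls : List String) : List (List (String × String)) :=
  if pvJoinStrip ls ≠ "" then [pvBlock (if k then "table" else "text") (pvJoinStrip ls)] else []

theorem pvAltGo_cons (l : String) (ls : List String) :
    pvAltGo (l :: ls)
      = pvEmit (pvIsTable l) (l :: (pvTakeRun (pvIsTable l) ls).1)
        ++ pvAltGo (pvTakeRun (pvIsTable l) ls).2 := by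
  rw [pvAltGo]; rfl

-- main invariant: from a state whose current run (kind k, lines cur ≠ []) is open,
-- A finishes to: blocks, then the block of the completed run cur ++ takeRun, then B on the rest
theorem pvMain (lines : List String) :
    ∀ (blocks : List (List (String × String))) (k : Bool) (cur : List String),
      cur ≠ [] →
      pvFinishA (lines.foldl pvStepA (blocks, (if k then "table" else "text"), cur))
        = blocks ++ pvEmit k (cur ++ (pvTakeRun k lines).1) ++ pvAltGo (pvTakeRun k lines).2 := by
  induction lines with
  | nil =>
    intro blocks k cur hcur
    simp only [List.foldl_nil, pvTakeRun, pvFinishA, pvEmit, pvAltGo]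
    cases k <;> simp [hcur] <;> split <;> simp
  | cons l ls ih =>
    intro blocks k cur hcur
    simp only [List.foldl_cons]
    by_cases hk : pvIsTable l = k
    · -- same kind: line joins the current run
      have hstep : pvStepA (blocks, (if k then "table" else "text"), cur) l
          = (blocks, (if k then "table" else "text"), cur ++ [l]) := by
        cases k <;> simp_all [pvStepA]
      rw [hstep, ih blocks k (cur ++ [l]) (by simp)]
      simp [pvTakeRun, hk]
    · -- kind flips: A flushes cur, B starts a new run at l
      have hstep : pvStepA (blocks, (if k then "table" else "text"), cur) l
          = (blocks ++ pvEmit k cur, (if pvIsTable l then "table" else "text"), [l]) := by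
        cases k <;> cases hl : pvIsTable l <;>
          simp_all [pvStepA, pvEmit, pvBlock] <;> split <;> simp
      rw [hstep, ih (blocks ++ pvEmit k cur) (pvIsTable l) [l] (by simp)]
      rw [pvTakeRun, if_neg hk, pvAltGo_cons]
      simp
-- ===== VERDICT (by name: the statement is the Claim_ definition above) =====
theorem split_text_and_tables_py_spec : Claim_equal_split_text_and_tables_py := by
  intro s _
  show split_text_and_tables_py s = split_text_and_tables_py_alt s
  unfold split_text_and_tables_py split_text_and_tables_py_alt
  cases h : (PySem.Str.split? s "\n").getD [] with
  | nil => simp [pvFinishA, pvAltGo]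
  | cons l ls =>
    simp only [List.foldl_cons]
    have hstep : pvStepA ([], "text", []) l
        = ([], (if pvIsTable l then "table" else "text"), [l]) := by
      cases hl : pvIsTable l <;> simp [pvStepA, hl]
    rw [hstep, pvMain ls [] (pvIsTable l) [l] (by simp), pvAltGo_cons]
    simp
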